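-- pv_equiv track=rewrite | github.com/Vento741/algo_bond | backend/app/modules/admin/system_service.py | _detect_module
-- ===== SOURCE A (Python) =====
-- def _detect_module(message: str) -> str:
--     """Определить модуль по тексту сообщения об ошибке."""
--     msg = message.lower()
--     if any(kw in msg for kw in ("bybit", "order", "position", "leverage")):
--         return "trading"
--     if "backtest" in msg:
--         return "backtest"
--     if any(kw in msg for kw in ("kline", "market", "candle", "pair")):
--         return "market"
--     if any(kw in msg for kw in ("strategy", "signal", "knn", "indicator")):
--         return "strategy"
--     if any(kw in msg for kw in ("auth", "login", "token", "password", "jwt")):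
--         return "auth"
--     return "other"
-- ===== SOURCE B (Python) =====
-- KEYWORD_PRIORITY = {
--     "bybit": 0, "order": 0, "position": 0, "leverage": 0,
--     "backtest": 1,
--     "kline": 2, "market": 2, "candle": 2, "pair": 2,
--     "strategy": 3, "signal": 3, "knn": 3, "indicator": 3,
--     "auth": 4, "login": 4, "token": 4, "password": 4, "jwt": 4,
-- }
-- MODULES = ("trading", "backtest", "market", "strategy", "auth")
--
-- def _detect_module(message: str) -> str:
--     msg = message.lower()
--     best = min((p for kw, p in KEYWORD_PRIORITY.items() if kw in msg), default=None)
--     return "other" if best is None else MODULES[best]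
-- ===== Notes on version B (the rewrite author's own statement) =====
-- stated objective: alternative
-- what changed: Instead of a short-circuiting if-chain over keyword groups, B uses a flat keyword-to-priority map, scans all keywords once taking the minimum priority among those contained in the lowercased message, and indexes a module table (no early return, different aggregation).
import Mathlib
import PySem

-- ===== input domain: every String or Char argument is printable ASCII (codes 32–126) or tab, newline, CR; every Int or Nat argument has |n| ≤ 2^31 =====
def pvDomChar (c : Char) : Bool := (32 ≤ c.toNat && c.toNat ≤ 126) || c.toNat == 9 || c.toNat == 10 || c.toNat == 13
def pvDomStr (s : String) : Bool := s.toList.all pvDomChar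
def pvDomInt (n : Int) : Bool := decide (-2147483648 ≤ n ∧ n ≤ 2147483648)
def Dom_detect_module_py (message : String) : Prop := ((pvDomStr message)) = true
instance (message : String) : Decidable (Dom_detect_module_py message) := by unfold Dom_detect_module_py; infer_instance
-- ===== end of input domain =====

-- B replaces A's short-circuiting if-chain by a flat keyword→priority map, taking the
-- minimum priority among all matching keywords (alternative aggregation, same cost).

-- ===== PORT A =====
def detect_module_py (message : String) : String :=
  let msg := PySem.Str.lower message
  if (["bybit", "order", "position", "leverage"].any (fun kw => PySem.Str.isIn kw msg)) then "trading"
  else if PySem.Str.isIn "backtest" msg then "backtest"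
  else if (["kline", "market", "candle", "pair"].any (fun kw => PySem.Str.isIn kw msg)) then "market"
  else if (["strategy", "signal", "knn", "indicator"].any (fun kw => PySem.Str.isIn kw msg)) then "strategy"
  else if (["auth", "login", "token", "password", "jwt"].any (fun kw => PySem.Str.isIn kw msg)) then "auth"
  else "other"

-- ===== PORT B =====
-- KEYWORD_PRIORITY dict, in insertion order
def pvKwPrio : List (String × Nat) :=
  [("bybit", 0), ("order", 0), ("position", 0), ("leverage", 0),
   ("backtest", 1),
   ("kline", 2), ("market", 2), ("candle", 2), ("pair", 2),
   ("strategy", 3), ("signal", 3), ("knn", 3), ("indicator", 3),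
   ("auth", 4), ("login", 4), ("token", 4), ("password", 4), ("jwt", 4)]

def pvModules : List String := ["trading", "backtest", "market", "strategy", "auth"]

-- one step of Python's min(...) over the filtered generator (None = no element yet)
def pvStep (msg : String) (acc : Option Nat) (kp : String × Nat) : Option Nat :=
  if PySem.Str.isIn kp.1 msg then
    some (match acc with | none => kp.2 | some q => min q kp.2)
  else acc

def detect_module_py_alt (message : String) : String :=
  let msg := PySem.Str.lower message
  match pvKwPrio.foldl (pvStep msg) none with
  | none => "other"
  | some b => pvModules.getD b "other"

-- ===== PRECONDITION & SPEC =====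
def Spec_detect_module_py (message : String) (out : String) : Prop := out = detect_module_py_alt message
instance (message : String) (out : String) : Decidable (Spec_detect_module_py message out) := by unfold Spec_detect_module_py; infer_instance

-- ===== CLAIM (what is proved, stated in full; the proofs are below) =====
def Claim_equal_detect_module_py : Prop := ∀ (message : String), Dom_detect_module_py message → Spec_detect_module_py message (detect_module_py message)

-- ===== LEMMAS AND PROOFS =====

-- folding over keywords none of which occurs in msg leaves the accumulator unchanged
theorem pv_fold_false (msg : String) (l : List (String × Nat)) (acc : Option Nat)
    (h : ∀ kp ∈ l, PySem.Str.isIn kp.1 msg = false) :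
    l.foldl (pvStep msg) acc = acc := by
  induction l generalizing acc with
  | nil => rfl
  | cons kp rest ih =>
      have h1 := h kp (by simp)
      have hstep : pvStep msg acc kp = acc := by unfold pvStep; rw [h1]; simp
      rw [List.foldl_cons, hstep]
      exact ih acc (fun x hx => h x (by simp [hx]))

-- once the minimum-so-far p is ≤ every remaining priority, it is final
theorem pv_fold_ge (msg : String) (l : List (String × Nat)) (p : Nat)
    (h : ∀ kp ∈ l, p ≤ kp.2) :
    l.foldl (pvStep msg) (some p) = some p := by
  induction l with
  | nil => rfl
  | cons kp rest ih =>
      have h1 := h kp (by simp)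
      have hstep : pvStep msg (some p) kp = some p := by
        unfold pvStep; split <;> simp [Nat.min_eq_left h1]
      rw [List.foldl_cons, hstep]
      exact ih (fun x hx => h x (by simp [hx]))

-- a group whose priorities are all g and which contains a matching keyword folds none to some g
theorem pv_fold_group (msg : String) (l : List (String × Nat)) (g : Nat)
    (hall : ∀ kp ∈ l, kp.2 = g)
    (hsome : ∃ kp ∈ l, PySem.Str.isIn kp.1 msg = true) :
    l.foldl (pvStep msg) none = some g := by
  induction l with
  | nil => simp at hsome
  | cons kp rest ih =>
      by_cases hk : PySem.Str.isIn kp.1 msg = true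
      · have hg := hall kp (by simp)
        have hstep : pvStep msg none kp = some g := by unfold pvStep; rw [hk]; simp [hg]
        rw [List.foldl_cons, hstep]
        exact pv_fold_ge msg rest g (fun x hx => le_of_eq (hall x (by simp [hx])).symm)
      · have hk' : PySem.Str.isIn kp.1 msg = false := by
          cases hb : PySem.Str.isIn kp.1 msg
          · rfl
          · exact absurd hb hk
        have hstep : pvStep msg none kp = none := by unfold pvStep; rw [hk']; simp
        rw [List.foldl_cons, hstep]
        apply ih (fun x hx => hall x (by simp [hx]))
        rcases hsome with ⟨x, hx, hmx⟩
        rcases List.mem_cons.mp hx with h | h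
        · exact absurd (h ▸ hmx) hk
        · exact ⟨x, h, hmx⟩

-- prefix all-false, group g has a match with all priorities g, suffix priorities ≥ g
theorem pv_branch (msg : String) (pre grp suf : List (String × Nat)) (g : Nat)
    (hpre : ∀ kp ∈ pre, PySem.Str.isIn kp.1 msg = false)
    (hall : ∀ kp ∈ grp, kp.2 = g)
    (hsome : ∃ kp ∈ grp, PySem.Str.isIn kp.1 msg = true)
    (hsuf : ∀ kp ∈ suf, g ≤ kp.2) :
    (pre ++ (grp ++ suf)).foldl (pvStep msg) none = some g := by
  rw [List.foldl_append, pv_fold_false msg pre none hpre, List.foldl_append,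
    pv_fold_group msg grp g hall hsome, pv_fold_ge msg suf g hsuf]


-- ===== VERDICT (by name: the statement is the Claim_ definition above) =====
theorem detect_module_py_spec : Claim_equal_detect_module_py := by
  intro message _
  unfold Spec_detect_module_py detect_module_py detect_module_py_alt
  set msg := PySem.Str.lower message with hmsg
  dsimp only
  split_ifs with h0 h1 h2 h3 h4
  -- trading
  · simp only [List.any_eq_true, List.mem_cons, List.not_mem_nil, or_false,
      exists_eq_or_imp, exists_eq_left] at h0
    have hr : pvKwPrio.foldl (pvStep msg) none = some 0 := by
      rw [show pvKwPrio = [] ++ ([("bybit", 0), ("order", 0), ("position", 0), ("leverage", 0)] ++ [("backtest", 1), ("kline", 2), ("market", 2), ("candle", 2), ("pair", 2), ("strategy", 3), ("signal", 3), ("knn", 3), ("indicator", 3), ("auth", 4), ("login", 4), ("token", 4), ("password", 4), ("jwt", 4)]) from rfl]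
      refine pv_branch msg _ _ _ 0 ?_ (by decide) ?_ (by decide)
      · intro kp hkp; simp at hkp
      · rcases h0 with h | h | h | h
        · exact ⟨("bybit", 0), by simp, h⟩
        · exact ⟨("order", 0), by simp, h⟩
        · exact ⟨("position", 0), by simp, h⟩
        · exact ⟨("leverage", 0), by simp, h⟩
    rw [hr]
    rfl
  -- backtest
  · simp only [List.any_eq_true, List.mem_cons, List.not_mem_nil, or_false,
      exists_eq_or_imp, exists_eq_left, not_or, Bool.not_eq_true] at h0 h1
    obtain ⟨hf00, hf01, hf02, hf03⟩ := h0
    have hr : pvKwPrio.foldl (pvStep msg) none = some 1 := by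
      rw [show pvKwPrio = [("bybit", 0), ("order", 0), ("position", 0), ("leverage", 0)] ++ ([("backtest", 1)] ++ [("kline", 2), ("market", 2), ("candle", 2), ("pair", 2), ("strategy", 3), ("signal", 3), ("knn", 3), ("indicator", 3), ("auth", 4), ("login", 4), ("token", 4), ("password", 4), ("jwt", 4)]) from rfl]
      refine pv_branch msg _ _ _ 1 ?_ (by decide) ?_ (by decide)
      · simp only [List.forall_mem_cons]
        exact ⟨hf00, hf01, hf02, hf03, List.forall_mem_nil _⟩
      · exact ⟨("backtest", 1), by simp, h1⟩
    rw [hr]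
    rfl
  -- market
  · simp only [List.any_eq_true, List.mem_cons, List.not_mem_nil, or_false,
      exists_eq_or_imp, exists_eq_left, not_or, Bool.not_eq_true] at h0 h1 h2
    obtain ⟨hf00, hf01, hf02, hf03⟩ := h0
    have hr : pvKwPrio.foldl (pvStep msg) none = some 2 := by
      rw [show pvKwPrio = [("bybit", 0), ("order", 0), ("position", 0), ("leverage", 0), ("backtest", 1)] ++ ([("kline", 2), ("market", 2), ("candle", 2), ("pair", 2)] ++ [("strategy", 3), ("signal", 3), ("knn", 3), ("indicator", 3), ("auth", 4), ("login", 4), ("token", 4), ("password", 4), ("jwt", 4)]) from rfl]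
      refine pv_branch msg _ _ _ 2 ?_ (by decide) ?_ (by decide)
      · simp only [List.forall_mem_cons]
        exact ⟨hf00, hf01, hf02, hf03, h1, List.forall_mem_nil _⟩
      · rcases h2 with h | h | h | h
        · exact ⟨("kline", 2), by simp, h⟩
        · exact ⟨("market", 2), by simp, h⟩
        · exact ⟨("candle", 2), by simp, h⟩
        · exact ⟨("pair", 2), by simp, h⟩
    rw [hr]
    rfl
  -- strategy
  · simp only [List.any_eq_true, List.mem_cons, List.not_mem_nil, or_false,
      exists_eq_or_imp, exists_eq_left, not_or, Bool.not_eq_true] at h0 h1 h2 h3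
    obtain ⟨hf00, hf01, hf02, hf03⟩ := h0
    obtain ⟨hf20, hf21, hf22, hf23⟩ := h2
    have hr : pvKwPrio.foldl (pvStep msg) none = some 3 := by
      rw [show pvKwPrio = [("bybit", 0), ("order", 0), ("position", 0), ("leverage", 0), ("backtest", 1), ("kline", 2), ("market", 2), ("candle", 2), ("pair", 2)] ++ ([("strategy", 3), ("signal", 3), ("knn", 3), ("indicator", 3)] ++ [("auth", 4), ("login", 4), ("token", 4), ("password", 4), ("jwt", 4)]) from rfl]
      refine pv_branch msg _ _ _ 3 ?_ (by decide) ?_ (by decide)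
      · simp only [List.forall_mem_cons]
        exact ⟨hf00, hf01, hf02, hf03, h1, hf20, hf21, hf22, hf23, List.forall_mem_nil _⟩
      · rcases h3 with h | h | h | h
        · exact ⟨("strategy", 3), by simp, h⟩
        · exact ⟨("signal", 3), by simp, h⟩
        · exact ⟨("knn", 3), by simp, h⟩
        · exact ⟨("indicator", 3), by simp, h⟩
    rw [hr]
    rfl
  -- auth
  · simp only [List.any_eq_true, List.mem_cons, List.not_mem_nil, or_false,
      exists_eq_or_imp, exists_eq_left, not_or, Bool.not_eq_true] at h0 h1 h2 h3 h4
    obtain ⟨hf00, hf01, hf02, hf03⟩ := h0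
    obtain ⟨hf20, hf21, hf22, hf23⟩ := h2
    obtain ⟨hf30, hf31, hf32, hf33⟩ := h3
    have hr : pvKwPrio.foldl (pvStep msg) none = some 4 := by
      rw [show pvKwPrio = [("bybit", 0), ("order", 0), ("position", 0), ("leverage", 0), ("backtest", 1), ("kline", 2), ("market", 2), ("candle", 2), ("pair", 2), ("strategy", 3), ("signal", 3), ("knn", 3), ("indicator", 3)] ++ ([("auth", 4), ("login", 4), ("token", 4), ("password", 4), ("jwt", 4)] ++ []) from rfl]
      refine pv_branch msg _ _ _ 4 ?_ (by decide) ?_ (by decide)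
      · simp only [List.forall_mem_cons]
        exact ⟨hf00, hf01, hf02, hf03, h1, hf20, hf21, hf22, hf23, hf30, hf31, hf32, hf33, List.forall_mem_nil _⟩
      · rcases h4 with h | h | h | h | h
        · exact ⟨("auth", 4), by simp, h⟩
        · exact ⟨("login", 4), by simp, h⟩
        · exact ⟨("token", 4), by simp, h⟩
        · exact ⟨("password", 4), by simp, h⟩
        · exact ⟨("jwt", 4), by simp, h⟩
    rw [hr]
    rfl
  -- other
  · simp only [List.any_eq_true, List.mem_cons, List.not_mem_nil, or_false,
      exists_eq_or_imp, exists_eq_left, not_or, Bool.not_eq_true] at h0 h1 h2 h3 h4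
    obtain ⟨hf00, hf01, hf02, hf03⟩ := h0
    obtain ⟨hf20, hf21, hf22, hf23⟩ := h2
    obtain ⟨hf30, hf31, hf32, hf33⟩ := h3
    obtain ⟨hf40, hf41, hf42, hf43, hf44⟩ := h4
    have hr : pvKwPrio.foldl (pvStep msg) none = none := by
      apply pv_fold_false
      simp only [pvKwPrio, List.forall_mem_cons]
      exact ⟨hf00, hf01, hf02, hf03, h1, hf20, hf21, hf22, hf23, hf30, hf31, hf32, hf33, hf40, hf41, hf42, hf43, hf44, List.forall_mem_nil _⟩
    rw [hr]
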